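-- pv_equiv track=rewrite | github.com/XOM91K/EGE | olds/Konstantin2_Ege_2025/23/7.py | f
-- ===== SOURCE A (Python) =====
-- def f(x,y,s):
--     if x > y or s.count('b') > 3:
--         return 0
--     if x == y and s[-1] != 'a':
--         return 0
--     if x == y and s[-1] == 'a':
--         return 1
--     if x < y:
--         return f(x+3,y,s +'a') + f(x+4,y,s + 'b') + f(x**2,y,s + 'c')
-- ===== SOURCE B (Python) =====
-- def f(x, y, s):
--     if x > y or s.count('b') > 3:
--         return 0
--     if x == y:
--         return 1 if s[-1] == 'a' else 0
--     # x < y: bottom-up tabulation over states (u, b-count); the last appended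
--     # character only matters at a leaf u == y, and only an 'a'-step can accept.
--     N = {}
--     def val(v, ncb, is_a):
--         if ncb > 3 or v > y:
--             return 0
--         if v == y:
--             return 1 if is_a else 0
--         return N.get((v, ncb), 0)
--     for u in range(y - 1, x - 1, -1):
--         for cb in (3, 2, 1, 0):
--             N[(u, cb)] = val(u + 3, cb, True) + val(u + 4, cb + 1, False) + val(u * u, cb, False)
--     return N.get((x, s.count('b')), 0)
-- ===== Notes on version B (the rewrite author's own statement) =====
-- stated objective: faster
-- what changed: Replaces the exponential branching recursion over growing strings by a bottom-up dynamic-programming table over the O(y-x) reachable states (u, b-count), exploiting that the string only matters through its 'b'-count and the last appended character.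
-- outside the precondition, e.g. on f(-2, 1, ''): A returns 1, B returns 1
import Mathlib
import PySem

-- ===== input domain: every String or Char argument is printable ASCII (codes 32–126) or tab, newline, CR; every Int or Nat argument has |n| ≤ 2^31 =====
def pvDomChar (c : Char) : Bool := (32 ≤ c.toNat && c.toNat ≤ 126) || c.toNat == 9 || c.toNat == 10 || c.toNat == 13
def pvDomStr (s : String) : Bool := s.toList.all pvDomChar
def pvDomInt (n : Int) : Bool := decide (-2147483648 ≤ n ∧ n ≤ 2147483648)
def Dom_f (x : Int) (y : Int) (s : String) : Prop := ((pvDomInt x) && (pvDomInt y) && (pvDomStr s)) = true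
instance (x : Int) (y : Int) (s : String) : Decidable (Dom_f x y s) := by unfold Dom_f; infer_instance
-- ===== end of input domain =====

-- B replaces A's branching recursion over growing strings by a bottom-up DP table over the states (u, b-count).

-- ===== PORT A =====
-- fuel-based transliteration of A's recursion; the fuel (y-x).toNat+1 is sufficient on Pre_f
def fA_go (y : Int) : Nat → Int → List Char → Int
  | 0, _, _ => 0
  | n+1, x, s =>
    if x > y ∨ PySem.Chars.count s ['b'] > 3 then 0
    else if x = y ∧ ¬ (PySem.List.pyGet? s (-1) = some 'a') then 0
    else if x = y ∧ PySem.List.pyGet? s (-1) = some 'a' then 1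
    else if x < y then
      fA_go y n (x+3) (s ++ ['a']) + fA_go y n (x+4) (s ++ ['b']) + fA_go y n (x*x) (s ++ ['c'])
    else 0

def f (x : Int) (y : Int) (s : String) : Int := fA_go y ((y - x).toNat + 1) x s.toList

-- ===== PORT B =====
-- helper `val` of Source B
def fB_val (y : Int) (N : PySem.Dict (Int × Int) Int) (v : Int) (ncb : Int) (isA : Bool) : Int :=
  if ncb > 3 ∨ v > y then 0
  else if v = y then (if isA then 1 else 0)
  else N.getD (v, ncb) 0

-- body of Source B's outer for-loop (one u; the inner loop runs over the literal tuple (3,2,1,0))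
def fB_step (y : Int) (N : PySem.Dict (Int × Int) Int) (u : Int) : PySem.Dict (Int × Int) Int :=
  ([3, 2, 1, 0] : List Int).foldl
    (fun N cb => N.insert (u, cb)
      (fB_val y N (u+3) cb true + fB_val y N (u+4) (cb+1) false + fB_val y N (u*u) cb false)) N

def f_alt (x : Int) (y : Int) (s : String) : Int :=
  if x > y ∨ PySem.Chars.count s.toList ['b'] > 3 then 0
  else if x = y then (if PySem.List.pyGet? s.toList (-1) = some 'a' then 1 else 0)
  else
    ((PySem.List.pyRange (y - 1) (x - 1) (-1)).foldl (fB_step y) PySem.Dict.empty).getD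
      (x, (PySem.Chars.count s.toList ['b'] : Int)) 0

-- ===== PRECONDITION & SPEC =====
-- Pre_f excludes (i) x = y with s = "", where A raises IndexError on s[-1], and (ii) recursing
-- inputs (x < y, ≤ 3 b's) with x < 2 and 0 < y, from which A's recursion can reach the absorbing
-- states x ∈ {0,1} and recurse forever; this bound is sufficient, not exact, so a few inputs on
-- which A does return are excluded too (e.g. (-2, 1, ''), where both programs return 1).
def Pre_f (x : Int) (y : Int) (s : String) : Prop :=
  (2 ≤ x ∨ y ≤ x ∨ PySem.Chars.count s.toList ['b'] > 3 ∨ y ≤ 0) ∧ ¬ (x = y ∧ s = "")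
instance (x : Int) (y : Int) (s : String) : Decidable (Pre_f x y s) := by unfold Pre_f; infer_instance
def pvWitness_f : Int × Int × String := (5, 9, "ab")

def Spec_f (x : Int) (y : Int) (s : String) (out : Int) : Prop := out = f_alt x y s
instance (x : Int) (y : Int) (s : String) (out : Int) : Decidable (Spec_f x y s out) := by unfold Spec_f; infer_instance

-- ===== CLAIM (what is proved, stated in full; the proofs are below) =====
def Claim_equal_f : Prop := ∀ (x : Int) (y : Int) (s : String), Dom_f x y s → Pre_f x y s → Spec_f x y s (f x y s)

-- ===== LEMMAS AND PROOFS =====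

-- reference count: A's recursion with the string compressed to (b-count, last-char-is-'a')
def cnt (y : Int) : Nat → Int → Int → Bool → Int
  | 0, _, _, _ => 0
  | n+1, u, cb, ok =>
    if u > y ∨ cb > 3 then 0
    else if u = y then (if ok then 1 else 0)
    else cnt y n (u+3) cb true + cnt y n (u+4) (cb+1) false + cnt y n (u*u) cb false

theorem count_singleton_go (c : Char) : ∀ (cs : List Char) (fuel acc : Nat), cs.length ≤ fuel →
    PySem.Chars.count.go [c] fuel cs acc = acc + cs.count c := by
  intro cs
  induction cs with
  | nil => intro fuel acc _; cases fuel <;> simp [PySem.Chars.count.go]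
  | cons a t ih =>
    intro fuel acc h
    cases fuel with
    | zero => simp at h
    | succ m =>
      by_cases hac : a = c
      · subst hac
        rw [show PySem.Chars.count.go [a] (m+1) (a :: t) acc
              = PySem.Chars.count.go [a] m t (acc + 1) by
            simp [PySem.Chars.count.go, List.isPrefixOf]]
        rw [ih m (acc + 1) (by simpa using h)]
        simp [List.count_cons]
        omega
      · rw [show PySem.Chars.count.go [c] (m+1) (a :: t) acc
              = PySem.Chars.count.go [c] m t acc by
            simp [PySem.Chars.count.go, List.isPrefixOf]
            intro hca; exact absurd hca.symm hac]
        rw [ih m acc (by simpa using h)]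
        simp [List.count_cons, hac]

theorem count_singleton (cs : List Char) (c : Char) :
    PySem.Chars.count cs [c] = cs.count c := by
  simpa [PySem.Chars.count] using count_singleton_go c cs cs.length 0 le_rfl

theorem cnt_of_gt {y : Int} (n : Nat) (u cb : Int) (ok : Bool) (h : u > y) :
    cnt y n u cb ok = 0 := by
  cases n <;> simp [cnt, h]

theorem cnt_ok_irrel {y : Int} (n : Nat) (u cb : Int) (ok ok' : Bool) (h : ¬ u = y) :
    cnt y n u cb ok = cnt y n u cb ok' := by
  cases n <;> simp [cnt, h]

theorem cnt_fuel {y : Int} : ∀ (n m : Nat) (u cb : Int) (ok : Bool),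
    (2 ≤ u ∨ y ≤ 0) → (y - u).toNat < n → (y - u).toNat < m →
    cnt y n u cb ok = cnt y m u cb ok := by
  intro n
  induction n with
  | zero => intro m u cb ok _ hn _; omega
  | succ n ih =>
    intro m u cb ok hu hn hm
    cases m with
    | zero => omega
    | succ m =>
      by_cases h1 : u > y ∨ cb > 3
      · simp [cnt, h1]
      · by_cases h2 : u = y
        · simp [cnt, h1, h2]
        · have huy : u < y := by
            rcases not_or.mp h1 with ⟨ha, _⟩; omega
          simp only [cnt, if_neg h1, if_neg h2]
          rcases hu with hu2 | hy0
          · have hsq : u + 2 ≤ u * u := by nlinarith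
            rw [ih m (u+3) cb true (Or.inl (by omega)) (by omega) (by omega),
                ih m (u+4) (cb+1) false (Or.inl (by omega)) (by omega) (by omega),
                ih m (u*u) cb false (Or.inl (by omega)) (by omega) (by omega)]
          · have hz : 0 < u * u := mul_pos_of_neg_of_neg (by omega) (by omega)
            have hsq : y < u * u := by omega
            rw [cnt_of_gt n (u*u) cb false hsq, cnt_of_gt m (u*u) cb false hsq,
                ih m (u+3) cb true (Or.inr hy0) (by omega) (by omega),
                ih m (u+4) (cb+1) false (Or.inr hy0) (by omega) (by omega)]

theorem fA_go_eq_cnt (y : Int) : ∀ (n : Nat) (x : Int) (s : List Char),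
    fA_go y n x s
      = cnt y n x ((s.count 'b' : Int)) (decide (PySem.List.pyGet? s (-1) = some 'a')) := by
  intro n
  induction n with
  | zero => intro x s; rfl
  | succ n ih =>
    intro x s
    simp only [fA_go, cnt, count_singleton]
    by_cases h1 : x > y ∨ s.count 'b' > 3
    · have h1' : x > y ∨ ((s.count 'b' : Int)) > 3 := by omega
      rw [if_pos h1, if_pos h1']
    · have h1' : ¬ (x > y ∨ ((s.count 'b' : Int)) > 3) := by omega
      rw [if_neg h1, if_neg h1']
      by_cases h2 : x = y
      · by_cases hp : PySem.List.pyGet? s (-1) = some 'a'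
        · have hA : ¬ (x = y ∧ ¬ (PySem.List.pyGet? s (-1) = some 'a')) := by simp [hp]
          rw [if_neg hA, if_pos (show x = y ∧ PySem.List.pyGet? s (-1) = some 'a' from ⟨h2, hp⟩),
              if_pos h2]
          simp [hp]
        · rw [if_pos (show x = y ∧ ¬ (PySem.List.pyGet? s (-1) = some 'a') from ⟨h2, hp⟩),
              if_pos h2]
          simp [hp]
      · have hn1 : ¬ (x = y ∧ ¬ (PySem.List.pyGet? s (-1) = some 'a')) := fun h => h2 h.1
        have hn2 : ¬ (x = y ∧ PySem.List.pyGet? s (-1) = some 'a') := fun h => h2 h.1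
        rw [if_neg hn1, if_neg hn2, if_neg h2]
        have h3 : x < y := by
          rcases not_or.mp h1 with ⟨ha, _⟩; omega
        rw [if_pos h3, ih, ih, ih]
        simp only [List.count_append, PySem.List.pyGet?_neg_one_append_singleton]
        norm_num [List.count_cons]
        simp

-- the DP-table invariant: every stored state (v, cb) with lo ≤ v < y holds the reference count
def DPInv (y lo : Int) (N : PySem.Dict (Int × Int) Int) : Prop :=
  ∀ v cb : Int, lo ≤ v → v < y → 0 ≤ cb → cb ≤ 3 →
    N.getD (v, cb) 0 = cnt y ((y - v).toNat + 1) v cb false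

theorem val_insert_ne (y : Int) (M : PySem.Dict (Int × Int) Int) (u k w c cb' : Int)
    (ok : Bool) (hc : ¬ c = u) :
    fB_val y (M.insert (u, k) w) c cb' ok = fB_val y M c cb' ok := by
  simp only [fB_val, PySem.Dict.getD_insert]
  rw [if_neg (show ¬ (((c, cb') : Int × Int) = (u, k)) from fun h => hc (congrArg Prod.fst h))]

theorem val_child (y u : Int) (N : PySem.Dict (Int × Int) Int)
    (hu : 2 ≤ u ∨ y ≤ 0) (huy : u < y) (hDPInv : DPInv y (u+1) N)
    (c cb' : Int) (hc : u < c) (hcb : 0 ≤ cb') (ok : Bool) :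
    fB_val y N c cb' ok = cnt y ((y - u).toNat) c cb' ok := by
  obtain ⟨n, hn'⟩ : ∃ n, (y - u).toNat = n + 1 := ⟨(y - u).toNat - 1, by omega⟩
  rw [hn']
  by_cases h1 : cb' > 3
  · rw [show fB_val y N c cb' ok = 0 by simp [fB_val, h1]]
    simp [cnt, h1]
  · by_cases h2 : c > y
    · rw [show fB_val y N c cb' ok = 0 by simp [fB_val, h2]]
      simp [cnt, h2]
    · by_cases h3 : c = y
      · rw [show fB_val y N c cb' ok = (if ok then 1 else 0) by
          simp [fB_val, h3, h1, h2]]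
        simp [cnt, h3, h1, h2]
      · have hcy : c < y := by omega
        rw [show fB_val y N c cb' ok = N.getD (c, cb') 0 by
          simp [fB_val, h3, h1, h2]]
        rw [hDPInv c cb' (by omega) hcy hcb (by omega)]
        rw [cnt_ok_irrel ((y - c).toNat + 1) c cb' false ok h3]
        exact cnt_fuel _ _ c cb' ok
          (by rcases hu with h | h; exacts [Or.inl (by omega), Or.inr h])
          (by omega) (by omega)

theorem step_preserves (y u : Int) (N : PySem.Dict (Int × Int) Int)
    (hu : 2 ≤ u ∨ y ≤ 0) (huy : u < y) (hDPInv : DPInv y (u+1) N) :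
    DPInv y u (fB_step y N u) := by
  have hc3 : ¬ (u + 3 : Int) = u := by omega
  have hc4 : ¬ (u + 4 : Int) = u := by omega
  have hsqlt : u < u * u := by
    rcases hu with h | h
    · nlinarith
    · have : 0 < u * u := mul_pos_of_neg_of_neg (by omega) (by omega)
      omega
  have hcq : ¬ (u * u : Int) = u := by omega
  intro v cb hv hvy hcb0 hcb3
  simp only [fB_step, List.foldl_cons, List.foldl_nil]
  simp only [val_insert_ne y _ u _ _ _ _ _ hc3, val_insert_ne y _ u _ _ _ _ _ hc4,
    val_insert_ne y _ u _ _ _ _ _ hcq]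
  simp only [PySem.Dict.getD_insert]
  by_cases hveq : v = u
  · subst hveq
    have hval : ∀ (cbv : Int), 0 ≤ cbv → cbv ≤ 3 →
        fB_val y N (v+3) cbv true + fB_val y N (v+4) (cbv+1) false
          + fB_val y N (v*v) cbv false
          = cnt y ((y - v).toNat + 1) v cbv false := by
      intro cbv hb0 hb3
      rw [val_child y v N hu hvy hDPInv (v+3) cbv (by omega) hb0 true,
          val_child y v N hu hvy hDPInv (v+4) (cbv+1) (by omega) (by omega) false,
          val_child y v N hu hvy hDPInv (v*v) cbv hsqlt hb0 false]
      simp only [cnt]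
      rw [if_neg (by omega), if_neg (by omega)]
    have hne : ∀ a b : Int, ¬ a = b → ¬ (((v, a) : Int × Int) = (v, b)) :=
      fun a b hab h => hab (congrArg Prod.snd h)
    have hcbv : cb = 0 ∨ cb = 1 ∨ cb = 2 ∨ cb = 3 := by omega
    rcases hcbv with h | h | h | h <;> subst h
    · rw [if_pos rfl]
      exact hval 0 (by omega) (by omega)
    · rw [if_neg (hne 1 0 (by norm_num)), if_pos rfl]
      exact hval 1 (by omega) (by omega)
    · rw [if_neg (hne 2 0 (by norm_num)), if_neg (hne 2 1 (by norm_num)), if_pos rfl]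
      exact hval 2 (by omega) (by omega)
    · rw [if_neg (hne 3 0 (by norm_num)), if_neg (hne 3 1 (by norm_num)),
          if_neg (hne 3 2 (by norm_num)), if_pos rfl]
      exact hval 3 (by omega) (by omega)
  · have hne : ∀ k : Int, ¬ (((v, cb) : Int × Int) = (u, k)) :=
      fun k h => hveq (congrArg Prod.fst h)
    rw [if_neg (hne 0), if_neg (hne 1), if_neg (hne 2), if_neg (hne 3)]
    exact hDPInv v cb (by omega) hvy hcb0 hcb3

theorem fold_inv (y x : Int) (hx : 2 ≤ x ∨ y ≤ 0) : ∀ (k : Nat) (a : Int)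
    (N : PySem.Dict (Int × Int) Int), (a - (x - 1)).toNat ≤ k → a < y → DPInv y (a+1) N →
    DPInv y x ((PySem.List.pyRange a (x - 1) (-1)).foldl (fB_step y) N) := by
  intro k
  induction k with
  | zero =>
    intro a N hk ha hDPInv
    rw [PySem.List.pyRange_neg_one_eq_nil (by omega)]
    intro v cb hv hvy hcb0 hcb3
    exact hDPInv v cb (by omega) hvy hcb0 hcb3
  | succ k ih =>
    intro a N hk ha hDPInv
    by_cases hax : a ≤ x - 1
    · rw [PySem.List.pyRange_neg_one_eq_nil hax]
      intro v cb hv hvy hcb0 hcb3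
      exact hDPInv v cb (by omega) hvy hcb0 hcb3
    · rw [PySem.List.pyRange_neg_one_cons (by omega), List.foldl_cons]
      have hstep := step_preserves y a N
        (by rcases hx with h | h; exacts [Or.inl (by omega), Or.inr h]) ha hDPInv
      exact ih (a-1) (fB_step y N a) (by omega) (by omega)
        (by rw [show a - 1 + 1 = a from by ring]; exact hstep)

-- ===== VERDICT (by name: the statement is the Claim_ definition above) =====
theorem f_spec : Claim_equal_f := by
  unfold Claim_equal_f
  intro x y s _ hpre
  obtain ⟨hp1, _⟩ := hpre
  unfold Spec_f f f_alt
  by_cases h1 : x > y ∨ PySem.Chars.count s.toList ['b'] > 3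
  · rw [if_pos h1]
    simp only [fA_go]
    rw [if_pos h1]
  · rw [if_neg h1]
    have hxy : ¬ x > y := fun h => h1 (Or.inl h)
    have hcb3 : PySem.Chars.count s.toList ['b'] ≤ 3 := by
      by_contra hc; exact h1 (Or.inr (by omega))
    by_cases h2 : x = y
    · rw [if_pos h2]
      simp only [fA_go]
      rw [if_neg h1]
      by_cases hp : PySem.List.pyGet? s.toList (-1) = some 'a'
      · rw [if_neg (by simp [hp]), if_pos ⟨h2, hp⟩, if_pos hp]
      · rw [if_pos ⟨h2, hp⟩, if_neg hp]
    · rw [if_neg h2]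
      have hlt : x < y := by omega
      have hx2 : 2 ≤ x ∨ y ≤ 0 := by
        rcases hp1 with h | h | h | h
        · exact Or.inl h
        · omega
        · omega
        · exact Or.inr h
      rw [fA_go_eq_cnt, cnt_ok_irrel _ _ _ _ false h2]
      have hempty : DPInv y (y - 1 + 1) PySem.Dict.empty := by
        intro v cb hv hvy _ _; omega
      have hDPInv := fold_inv y x hx2 ((y - 1) - (x - 1)).toNat (y - 1) PySem.Dict.empty
        le_rfl (by omega) hempty
      rw [count_singleton] at hcb3 ⊢
      rw [hDPInv x ((s.toList.count 'b' : Int)) le_rfl hlt (by exact_mod_cast Nat.zero_le _) (by exact_mod_cast hcb3)]
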